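-- pv_equiv track=rewrite | github.com/sharon-john/ds-algos | char_frequency.py | solve
-- ===== SOURCE A (Python) =====
-- def solve(list_of_strs):
--     # return Dict[char, List[char]]
--
--     chars_DB = dict()
--
--     #'database' data structure to represent the words with frequencies
--
--     for word in list_of_strs:
--         for char in word:
--             if char not in chars_DB:
--                 chars_DB[char] = { }
--
--             for char2 in word:
--                 if char != char2:
--                     if char2 not in chars_DB[char]:
--                         chars_DB[char][char2] = 1
--                     else:
--                         chars_DB[char][char2] +=1
--
--     return chars_DB
--
--     '''
--     chars_DB output:
--
--     {'a': {'b': 1, 'c': 1}, 'b': {'a': 1, 'c': 2, 'd': 1}, 'c': {'a': 1, 'b': 2, 'd': 2, 'e': 1},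
--      'd': {'b': 1, 'c': 2, 'e': 1}, 'e': {'c': 1, 'd': 1}}
--
--      Last portion: Need to further query this to return largest by key. Not completed.
--
--     '''
-- ===== SOURCE B (Python) =====
-- def solve(list_of_strs):
--     # Two-stage: (1) one pass over the words builds a flat counter keyed by
--     # ordered pairs (c, d) via per-word frequency products, plus the global
--     # first-occurrence order of characters; (2) the nested dict is assembled
--     # from the flat counter at the end.
--     char_order = {}
--     pair_counts = {}
--     for word in list_of_strs:
--         freq = {}
--         for ch in word:
--             char_order[ch] = None
--             freq[ch] = freq.get(ch, 0) + 1
--         for c in freq: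
--             for d in freq:
--                 if d != c:
--                     pair_counts[(c, d)] = pair_counts.get((c, d), 0) + freq[c] * freq[d]
--     result = {}
--     for c in char_order:
--         result[c] = {}
--     for (c, d), n in pair_counts.items():
--         result[c][d] = n
--     return result
-- ===== Notes on version B (the rewrite author's own statement) =====
-- stated objective: alternative
-- what changed: A updates a nested dict once per ordered pair of character occurrences inside each word; B makes one pass that accumulates a flat counter keyed by (c,d) pairs (adding freq[c]*freq[d] per word) together with the global first-occurrence order of characters, and assembles the nested dict from that flat counter in a final pass, reproducing A's exact counts and insertion orders.
import Mathlib
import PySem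

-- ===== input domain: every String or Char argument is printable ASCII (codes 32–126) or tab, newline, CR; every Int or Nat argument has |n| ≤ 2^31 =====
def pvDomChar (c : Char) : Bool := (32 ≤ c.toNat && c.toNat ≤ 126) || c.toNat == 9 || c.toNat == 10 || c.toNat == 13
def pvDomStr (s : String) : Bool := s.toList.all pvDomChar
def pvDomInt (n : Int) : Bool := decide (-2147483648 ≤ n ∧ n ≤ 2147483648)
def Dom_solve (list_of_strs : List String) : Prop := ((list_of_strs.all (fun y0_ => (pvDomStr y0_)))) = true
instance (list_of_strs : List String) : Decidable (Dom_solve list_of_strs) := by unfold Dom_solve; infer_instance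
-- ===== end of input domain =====

-- B replaces A's per-occurrence-pair updates of a nested dict by a one-pass flat
-- (c,d)-pair counter (freq[c]*freq[d] per word) plus a final assembly pass
-- (objective: alternative).

-- ===== PORT A =====
def solve (list_of_strs : List String) : List (String × List (String × Int)) :=
  let chars_DB : PySem.Dict Char (PySem.Dict Char Int) :=
    list_of_strs.foldl (fun db word =>
      word.toList.foldl (fun db char =>
        let db1 := if db.contains char then db else db.insert char PySem.Dict.empty
        word.toList.foldl (fun db char2 =>
          if char ≠ char2 then
            db.modify char PySem.Dict.empty (fun inner => inner.modify char2 0 (· + 1))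
          else db) db1) db)
      PySem.Dict.empty
  chars_DB.items.map (fun p => (p.1.toString, p.2.items.map (fun q => (q.1.toString, q.2))))

-- ===== PORT B =====
def solve_alt (list_of_strs : List String) : List (String × List (String × Int)) :=
  let st : PySem.Dict Char Unit × PySem.Dict (Char × Char) Int :=
    list_of_strs.foldl
      (fun st word =>
        let p := word.toList.foldl
          (fun (p : PySem.Dict Char Unit × PySem.Dict Char Int) ch =>
            (p.1.insert ch (), p.2.insert ch (p.2.getD ch 0 + 1)))
          (st.1, PySem.Dict.empty)
        let pair_counts := p.2.keys.foldl
          (fun pc c =>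
            p.2.keys.foldl
              (fun pc d =>
                if d ≠ c then pc.insert (c, d) (pc.getD (c, d) 0 + p.2.getD c 0 * p.2.getD d 0)
                else pc) pc)
          st.2
        (p.1, pair_counts))
      (PySem.Dict.empty, PySem.Dict.empty)
  let result0 : PySem.Dict Char (PySem.Dict Char Int) :=
    st.1.keys.foldl (fun r c => r.insert c PySem.Dict.empty) PySem.Dict.empty
  let result := st.2.items.foldl
    (fun r q => r.modify q.1.1 PySem.Dict.empty (fun inner => inner.insert q.1.2 q.2)) result0
  result.items.map (fun p => (p.1.toString, p.2.items.map (fun q => (q.1.toString, q.2))))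

-- ===== PRECONDITION & SPEC =====
def Spec_solve (list_of_strs : List String) (out : List (String × List (String × Int))) : Prop := out = solve_alt list_of_strs
instance (list_of_strs : List String) (out : List (String × List (String × Int))) : Decidable (Spec_solve list_of_strs out) := by unfold Spec_solve; infer_instance

-- ===== CLAIM (what is proved, stated in full; the proofs are below) =====
def Claim_equal_solve : Prop := ∀ (list_of_strs : List String), Dom_solve list_of_strs → Spec_solve list_of_strs (solve list_of_strs)

-- ===== LEMMAS AND PROOFS =====

abbrev PvInner := PySem.Dict Char Int
abbrev PvOuter := PySem.Dict Char PvInner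
abbrev PvPair := PySem.Dict (Char × Char) Int

-- ---- generic PySem.Set facts ----

theorem pv_update_add {α : Type} [BEq α] [LawfulBEq α] (s t : List α) (x : α) :
    PySem.Set.update s (PySem.Set.add t x) = PySem.Set.add (PySem.Set.update s t) x := by
  by_cases hx : x ∈ t
  · rw [PySem.Set.add_of_mem hx, PySem.Set.add_of_mem]
    simp [PySem.Set.mem_update]
    exact Or.inr hx
  · rw [PySem.Set.add_of_not_mem hx]
    show (t ++ [x]).foldl PySem.Set.add s = _
    rw [List.foldl_append]
    rfl

theorem pv_update_of_subset {α : Type} [BEq α] [LawfulBEq α] (s l : List α) (h : ∀ x ∈ l, x ∈ s) :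
    PySem.Set.update s l = s := by
  induction l generalizing s with
  | nil => rfl
  | cons x l ih =>
    show PySem.Set.update (PySem.Set.add s x) l = s
    rw [PySem.Set.add_of_mem (h x (by simp)), ih]
    intro y hy; exact h y (by simp [hy])

theorem pv_filter_add {α : Type} [BEq α] [LawfulBEq α] (t : List α) (x : α) (p : α → Bool) :
    (PySem.Set.add t x).filter p =
      (if p x then PySem.Set.add (t.filter p) x else t.filter p) := by
  by_cases hx : x ∈ t
  · rw [PySem.Set.add_of_mem hx]
    by_cases hp : p x
    · rw [if_pos hp, PySem.Set.add_of_mem (List.mem_filter.2 ⟨hx, hp⟩)]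
    · rw [if_neg hp]
  · rw [PySem.Set.add_of_not_mem hx, List.filter_append]
    by_cases hp : p x
    · rw [if_pos hp]
      rw [PySem.Set.add_of_not_mem (fun h => hx (List.mem_filter.1 h).1)]
      simp [hp]
    · simp [hp]

theorem pv_update_filter_aux {α : Type} [BEq α] [LawfulBEq α] (xs : List α) (t s : List α) (p : α → Bool) :
    PySem.Set.update s ((xs.foldl PySem.Set.add t).filter p) =
      PySem.Set.update (PySem.Set.update s (t.filter p)) (xs.filter p) := by
  induction xs generalizing t with
  | nil => rfl
  | cons x xs ih =>
    show PySem.Set.update s ((xs.foldl PySem.Set.add (PySem.Set.add t x)).filter p) = _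
    rw [ih, pv_filter_add]
    by_cases hp : p x
    · rw [if_pos hp, pv_update_add]
      simp only [List.filter_cons, hp, if_pos]
      rfl
    · rw [if_neg hp]
      simp only [List.filter_cons, hp]
      simp

theorem pv_update_filter_ofList {α : Type} [BEq α] [LawfulBEq α] (s xs : List α) (p : α → Bool) :
    PySem.Set.update s ((PySem.Set.ofList xs).filter p) = PySem.Set.update s (xs.filter p) := by
  rw [PySem.Set.ofList_eq_foldl, pv_update_filter_aux]
  rfl

theorem pv_filter_update {α : Type} [BEq α] [LawfulBEq α] (s l : List α) (p : α → Bool) :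
    (PySem.Set.update s l).filter p = PySem.Set.update (s.filter p) (l.filter p) := by
  induction l generalizing s with
  | nil => rfl
  | cons x l ih =>
    show (PySem.Set.update (PySem.Set.add s x) l).filter p = _
    rw [ih, pv_filter_add, List.filter_cons]
    by_cases hp : p x
    · simp only [hp, if_pos]
      rfl
    · simp [hp]

theorem pv_add_map {α β : Type} [BEq α] [LawfulBEq α] [BEq β] [LawfulBEq β]
    (f : α → β) (hf : Function.Injective f) (s : List α) (x : α) :
    PySem.Set.add (s.map f) (f x) = (PySem.Set.add s x).map f := by
  by_cases hx : x ∈ s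
  · rw [PySem.Set.add_of_mem hx, PySem.Set.add_of_mem (List.mem_map_of_mem hx)]
  · rw [PySem.Set.add_of_not_mem hx, PySem.Set.add_of_not_mem, List.map_append]
    · rfl
    · intro hm
      obtain ⟨y, hy, hxy⟩ := List.mem_map.1 hm
      exact hx (hf hxy ▸ hy)

theorem pv_update_map {α β : Type} [BEq α] [LawfulBEq α] [BEq β] [LawfulBEq β]
    (f : α → β) (hf : Function.Injective f) (s l : List α) :
    PySem.Set.update (s.map f) (l.map f) = (PySem.Set.update s l).map f := by
  induction l generalizing s with
  | nil => rfl
  | cons x l ih =>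
    show PySem.Set.update (PySem.Set.add (s.map f) (f x)) (l.map f) = _
    rw [pv_add_map f hf, ih]
    rfl

theorem pv_update_append_of_nodup {α : Type} [BEq α] [LawfulBEq α] :
    ∀ (l s : List α), l.Nodup → (∀ x ∈ l, x ∉ s) → PySem.Set.update s l = s ++ l := by
  intro l
  induction l with
  | nil => intro s _ _; show s = s ++ []; simp
  | cons x l ih =>
    intro s hl hs
    have hs' : ∀ y ∈ l, y ∉ s ++ [x] := by
      intro y hy hmem
      rcases List.mem_append.1 hmem with h1 | h1
      · exact hs y (by simp [hy]) h1
      · have hyx : y = x := by simpa using h1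
        exact (List.nodup_cons.1 hl).1 (hyx ▸ hy)
    show PySem.Set.update (PySem.Set.add s x) l = _
    rw [PySem.Set.add_of_not_mem (hs x (by simp)), ih (s ++ [x]) (List.nodup_cons.1 hl).2 hs']
    simp

theorem pv_update_nil_of_nodup {α : Type} [BEq α] [LawfulBEq α] (l : List α) (hl : l.Nodup) :
    PySem.Set.update [] l = l := by
  rw [pv_update_append_of_nodup l [] hl (by simp)]
  simp

-- ---- A-side building blocks ----

def pvInv (db : PvOuter) : Prop :=
  db.keys.Nodup ∧ ∀ x : Char, ((db.getD x PySem.Dict.empty).keys.Nodup)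

theorem pv_foldl_modifyc_facts (l : List Char) (c : Char) (p : Char → Prop) [DecidablePred p]
    (g : Char → PvInner → PvInner) (db : PvOuter) (hc : db.contains c = true) :
    (l.foldl (fun db x => if p x then db.modify c PySem.Dict.empty (g x) else db) db).keys = db.keys ∧
    (∀ x, (l.foldl (fun db x => if p x then db.modify c PySem.Dict.empty (g x) else db) db).getD x PySem.Dict.empty =
      if x = c then l.foldl (fun i x => if p x then g x i else i) (db.getD c PySem.Dict.empty)
      else db.getD x PySem.Dict.empty) := by
  induction l generalizing db with
  | nil => exact ⟨rfl, fun x => by by_cases hx : x = c <;> simp [hx]⟩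
  | cons a l ih =>
    by_cases hp : p a
    · have hkeys : (db.modify c PySem.Dict.empty (g a)).keys = db.keys := by
        rw [PySem.Dict.keys_modify, PySem.Dict.keys_insert_of_contains _ _ hc]
      have hc' : (db.modify c PySem.Dict.empty (g a)).contains c = true := by
        rw [PySem.Dict.contains_modify]; simp
      obtain ⟨k1, k2⟩ := ih (db.modify c PySem.Dict.empty (g a)) hc'
      refine ⟨?_, ?_⟩
      · simp only [List.foldl_cons, if_pos hp]
        rw [k1, hkeys]
      · intro x
        simp only [List.foldl_cons, if_pos hp]
        rw [k2 x]
        by_cases hx : x = c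
        · subst hx
          simp [PySem.Dict.getD_modify, hp]
        · simp only [if_neg hx]
          rw [PySem.Dict.getD_modify]
          simp [hx]
    · simp only [List.foldl_cons, if_neg hp]
      obtain ⟨k1, k2⟩ := ih db hc
      refine ⟨k1, fun x => ?_⟩
      rw [k2 x]

theorem pv_ensure_keys (db : PvOuter) (c : Char) :
    (if db.contains c then db else db.insert c PySem.Dict.empty).keys = PySem.Set.add db.keys c := by
  rw [PySem.Set.add_eq_ite]
  by_cases h : db.contains c
  · rw [if_pos h, if_pos ((PySem.Dict.contains_iff_mem_keys _ _).1 h)]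
  · rw [if_neg h, PySem.Dict.keys_insert_of_not_contains _ _ (by simpa using h),
      if_neg (fun hm => h ((PySem.Dict.contains_iff_mem_keys _ _).2 hm))]

theorem pv_ensure_contains (db : PvOuter) (c : Char) :
    (if db.contains c then db else db.insert c PySem.Dict.empty).contains c = true := by
  by_cases h : db.contains c
  · rw [if_pos h]; exact h
  · rw [if_neg h]; exact PySem.Dict.contains_insert_self _ _ _

theorem pv_ensure_getD (db : PvOuter) (c x : Char) :
    (if db.contains c then db else db.insert c PySem.Dict.empty).getD x PySem.Dict.empty =
      db.getD x PySem.Dict.empty := by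
  by_cases h : db.contains c
  · rw [if_pos h]
  · rw [if_neg h]
    by_cases hx : x = c
    · subst hx
      rw [PySem.Dict.getD_insert_self, PySem.Dict.getD_of_not_contains _ _ (by simpa using h)]
    · rw [PySem.Dict.getD_insert_of_ne _ _ _ hx]

theorem pv_foldl_step_facts (u : List Char) (step : Char → PvOuter → PvOuter) (P : Char → PvInner → PvInner)
    (hk : ∀ c db, (step c db).keys = PySem.Set.add db.keys c)
    (hg : ∀ c db x, (step c db).getD x PySem.Dict.empty =
      if x = c then P c (db.getD c PySem.Dict.empty) else db.getD x PySem.Dict.empty)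
    (db : PvOuter) :
    (u.foldl (fun db c => step c db) db).keys = PySem.Set.update db.keys u ∧
    (∀ x, (u.foldl (fun db c => step c db) db).getD x PySem.Dict.empty =
      (P x)^[u.count x] (db.getD x PySem.Dict.empty)) := by
  induction u generalizing db with
  | nil => exact ⟨rfl, fun x => by simp⟩
  | cons c u ih =>
    obtain ⟨k1, k2⟩ := ih (step c db)
    refine ⟨?_, ?_⟩
    · simpa [k1, hk c db] using rfl
    · intro x
      simp only [List.foldl_cons]
      rw [k2 x, hg c db x]
      by_cases hx : x = c
      · subst hx
        rw [if_pos rfl, ← Function.iterate_succ_apply]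
        simp [List.count_cons]
      · rw [if_neg hx]
        simp [List.count_cons, Ne.symm hx]

def pvPassA (w : List Char) (c : Char) (inner : PvInner) : PvInner :=
  w.foldl (fun i x => if c ≠ x then i.modify x 0 (· + 1) else i) inner

theorem pv_passA_filter (w : List Char) (c : Char) (inner : PvInner) :
    pvPassA w c inner =
      (w.filter (fun x => decide (c ≠ x))).foldl (fun i x => i.modify x 0 (· + 1)) inner := by
  rw [pvPassA, List.foldl_filter]
  simp

theorem pv_passA_keys (w : List Char) (c : Char) (inner : PvInner) :
    (pvPassA w c inner).keys = PySem.Set.update inner.keys (w.filter (fun x => decide (c ≠ x))) := by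
  rw [pv_passA_filter]
  exact PySem.Dict.keys_foldl_modify _ _ (fun _ _ => (· + 1)) _

theorem pv_passA_getD (w : List Char) (c : Char) (inner : PvInner) (v : Char) :
    (pvPassA w c inner).getD v 0 = inner.getD v 0 + ((w.filter (fun x => decide (c ≠ x))).count v : Int) := by
  rw [pv_passA_filter]
  exact PySem.Dict.getD_foldl_modify_add_one _ _ _

theorem pv_passA_nodup (w : List Char) (c : Char) (inner : PvInner) (h : inner.keys.Nodup) :
    (pvPassA w c inner).keys.Nodup := by
  rw [pv_passA_filter]
  exact PySem.Dict.nodup_keys_foldl_modify_key _ (fun x => x) _ (fun _ _ => (· + 1)) _ h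

theorem pv_update_idem {α : Type} [BEq α] [LawfulBEq α] (s l : List α) :
    PySem.Set.update (PySem.Set.update s l) l = PySem.Set.update s l := by
  apply pv_update_of_subset
  intro x hx
  rw [PySem.Set.mem_update]
  exact Or.inr hx

theorem pv_passA_iter_keys (w : List Char) (c : Char) (k : Nat) (hk : 1 ≤ k) (inner : PvInner) :
    ((pvPassA w c)^[k] inner).keys = PySem.Set.update inner.keys (w.filter (fun x => decide (c ≠ x))) := by
  induction k with
  | zero => omega
  | succ k ih =>
    rw [Function.iterate_succ_apply']
    rcases Nat.eq_or_lt_of_le hk with h1 | h1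
    · have : k = 0 := by omega
      subst this
      simpa using pv_passA_keys w c inner
    · rw [pv_passA_keys, ih (by omega), pv_update_idem]

theorem pv_passA_iter_getD (w : List Char) (c : Char) (k : Nat) (inner : PvInner) (v : Char) :
    ((pvPassA w c)^[k] inner).getD v 0 =
      inner.getD v 0 + (k : Int) * ((w.filter (fun x => decide (c ≠ x))).count v : Int) := by
  induction k with
  | zero => simp
  | succ k ih =>
    rw [Function.iterate_succ_apply', pv_passA_getD, ih]
    push_cast
    ring

theorem pv_passA_iter_nodup (w : List Char) (c : Char) (k : Nat) (inner : PvInner) (h : inner.keys.Nodup) :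
    ((pvPassA w c)^[k] inner).keys.Nodup := by
  induction k with
  | zero => simpa
  | succ k ih => rw [Function.iterate_succ_apply']; exact pv_passA_nodup _ _ _ ih

def pvStepA (w : List Char) (db : PvOuter) : PvOuter :=
  w.foldl (fun db char =>
    let db1 := if db.contains char then db else db.insert char PySem.Dict.empty
    w.foldl (fun db char2 =>
      if char ≠ char2 then
        db.modify char PySem.Dict.empty (fun inner => inner.modify char2 0 (· + 1))
      else db) db1) db

def pvStepAc (w : List Char) (c : Char) (db : PvOuter) : PvOuter :=
  w.foldl (fun db char2 =>
      if c ≠ char2 then db.modify c PySem.Dict.empty (fun inner => inner.modify char2 0 (· + 1)) else db)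
    (if db.contains c then db else db.insert c PySem.Dict.empty)

theorem pv_stepA_eq_foldl (w : List Char) (db : PvOuter) :
    pvStepA w db = w.foldl (fun db c => pvStepAc w c db) db := rfl

theorem pv_stepAc_keys (w : List Char) (c : Char) (db : PvOuter) :
    (pvStepAc w c db).keys = PySem.Set.add db.keys c := by
  have h := (pv_foldl_modifyc_facts w c (fun x => c ≠ x)
    (fun x inner => inner.modify x 0 (· + 1)) _ (pv_ensure_contains db c)).1
  rw [pvStepAc, h, pv_ensure_keys]

theorem pv_stepAc_getD (w : List Char) (c : Char) (db : PvOuter) (x : Char) :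
    (pvStepAc w c db).getD x PySem.Dict.empty =
      if x = c then pvPassA w c (db.getD c PySem.Dict.empty) else db.getD x PySem.Dict.empty := by
  have h := (pv_foldl_modifyc_facts w c (fun x => c ≠ x)
    (fun x inner => inner.modify x 0 (· + 1)) _ (pv_ensure_contains db c)).2 x
  rw [pvStepAc, h, pv_ensure_getD, pv_ensure_getD]
  rfl

theorem pv_stepA_facts (w : List Char) (db : PvOuter) :
    (pvStepA w db).keys = PySem.Set.update db.keys w ∧
    (∀ x, (pvStepA w db).getD x PySem.Dict.empty = (pvPassA w x)^[w.count x] (db.getD x PySem.Dict.empty)) := by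
  rw [pv_stepA_eq_foldl]
  exact pv_foldl_step_facts w (pvStepAc w) (fun c => pvPassA w c)
    (fun c db0 => pv_stepAc_keys w c db0) (fun c db0 x => pv_stepAc_getD w c db0 x) db

theorem pv_stepA_inv (w : List Char) (db : PvOuter) (h : pvInv db) : pvInv (pvStepA w db) := by
  obtain ⟨ka, ga⟩ := pv_stepA_facts w db
  constructor
  · rw [ka]; exact PySem.Set.nodup_update _ _ h.1
  · intro x
    rw [ga x]
    exact pv_passA_iter_nodup _ _ _ _ (h.2 x)

-- canonical orders and counts
def pvKeysAll (ws : List String) : List Char := ws.foldl (fun s w => PySem.Set.update s w.toList) []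

def pvInnerKeys (ws : List String) (c : Char) : List Char :=
  ws.foldl (fun s w =>
    if c ∈ w.toList then PySem.Set.update s (w.toList.filter (fun x => decide (c ≠ x))) else s) []

def pvPairList (w : List Char) : List (Char × Char) :=
  (PySem.Set.ofList w).flatMap (fun c => ((PySem.Set.ofList w).filter (fun d => decide (d ≠ c))).map (fun d => (c, d)))

def pvPairKeys (ws : List String) : List (Char × Char) :=
  ws.foldl (fun s w => PySem.Set.update s (pvPairList w.toList)) []

theorem pv_A_run (ws : List String) (db : PvOuter) (h : pvInv db) :
    (ws.foldl (fun db w => pvStepA w.toList db) db).keys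
        = ws.foldl (fun s w => PySem.Set.update s w.toList) db.keys
    ∧ pvInv (ws.foldl (fun db w => pvStepA w.toList db) db)
    ∧ (∀ c, ((ws.foldl (fun db w => pvStepA w.toList db) db).getD c PySem.Dict.empty).keys
        = ws.foldl (fun s w =>
            if c ∈ w.toList then PySem.Set.update s (w.toList.filter (fun x => decide (c ≠ x))) else s)
          ((db.getD c PySem.Dict.empty).keys))
    ∧ (∀ c d, ((ws.foldl (fun db w => pvStepA w.toList db) db).getD c PySem.Dict.empty).getD d 0
        = (db.getD c PySem.Dict.empty).getD d 0
          + (ws.map (fun w => (w.toList.count c : Int)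
              * ((w.toList.filter (fun x => decide (c ≠ x))).count d : Int))).sum) := by
  induction ws generalizing db with
  | nil => exact ⟨rfl, h, fun c => rfl, fun c d => by simp⟩
  | cons w ws ih =>
    obtain ⟨hk, hg⟩ := pv_stepA_facts w.toList db
    obtain ⟨k1, k2, k3, k4⟩ := ih (pvStepA w.toList db) (pv_stepA_inv w.toList db h)
    refine ⟨?_, k2, ?_, ?_⟩
    · simp only [List.foldl_cons]
      rw [k1, hk]
    · intro c
      simp only [List.foldl_cons]
      rw [k3 c, hg c]
      by_cases hc : c ∈ w.toList
      · have h1 : 1 ≤ w.toList.count c := List.count_pos_iff.2 hc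
        rw [pv_passA_iter_keys _ _ _ h1, if_pos hc]
      · have h0 : w.toList.count c = 0 := List.count_eq_zero.2 hc
        rw [h0, if_neg hc]
        rfl
    · intro c d
      simp only [List.foldl_cons]
      rw [k4 c d, hg c, pv_passA_iter_getD]
      simp only [List.map_cons, List.sum_cons]
      ring

-- ---- B-side building blocks ----

def pvPairStep (w : List Char) (pc : PvPair) : PvPair :=
  (PySem.Set.ofList w).foldl (fun pc c =>
    (PySem.Set.ofList w).foldl (fun pc d =>
      if d ≠ c then pc.insert (c, d) (pc.getD (c, d) 0 + (w.count c : Int) * (w.count d : Int)) else pc) pc) pc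

def pvBodyB (st : PySem.Dict Char Unit × PvPair) (word : String) :
    PySem.Dict Char Unit × PvPair :=
  let p := word.toList.foldl
    (fun (p : PySem.Dict Char Unit × PySem.Dict Char Int) ch =>
      (p.1.insert ch (), p.2.insert ch (p.2.getD ch 0 + 1)))
    (st.1, PySem.Dict.empty)
  let pair_counts := p.2.keys.foldl
    (fun pc c =>
      p.2.keys.foldl
        (fun pc d =>
          if d ≠ c then pc.insert (c, d) (pc.getD (c, d) 0 + p.2.getD c 0 * p.2.getD d 0)
          else pc) pc)
    st.2
  (p.1, pair_counts)

theorem pv_B_word (co : PySem.Dict Char Unit) (pc : PvPair) (w : String) :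
    pvBodyB (co, pc) w
    = (w.toList.foldl (fun co ch => co.insert ch ()) co, pvPairStep w.toList pc) := by
  simp only [pvBodyB]
  have hsplit := PySem.List.foldl_prod_mk
    (fun (co : PySem.Dict Char Unit) (ch : Char) => co.insert ch ())
    (fun (fr : PySem.Dict Char Int) (ch : Char) => fr.insert ch (fr.getD ch 0 + 1))
    w.toList co PySem.Dict.empty
  rw [show (fun (p : PySem.Dict Char Unit × PySem.Dict Char Int) ch =>
        (p.1.insert ch (), p.2.insert ch (p.2.getD ch 0 + 1)))
      = (fun (s : PySem.Dict Char Unit × PySem.Dict Char Int) e =>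
        ((fun (co : PySem.Dict Char Unit) (ch : Char) => co.insert ch ()) s.1 e,
         (fun (fr : PySem.Dict Char Int) (ch : Char) => fr.insert ch (fr.getD ch 0 + 1)) s.2 e)) from rfl,
    hsplit]
  simp only [PySem.Dict.foldl_insert_getD_add_one_eq_counter, PySem.Dict.keys_counter,
    PySem.Dict.getD_counter, pvPairStep]

theorem pv_B_split (ws : List String) (co : PySem.Dict Char Unit) (pc : PvPair) :
    ws.foldl pvBodyB (co, pc)
    = (ws.foldl (fun co w => w.toList.foldl (fun co ch => co.insert ch ()) co) co,
       ws.foldl (fun pc w => pvPairStep w.toList pc) pc) := by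
  induction ws generalizing co pc with
  | nil => rfl
  | cons w ws ih =>
    simp only [List.foldl_cons]
    rw [pv_B_word co pc w, ih]

theorem pv_co_run (ws : List String) (co : PySem.Dict Char Unit) :
    (ws.foldl (fun co w => w.toList.foldl (fun co ch => co.insert ch ()) co) co).keys
      = ws.foldl (fun s w => PySem.Set.update s w.toList) co.keys := by
  induction ws generalizing co with
  | nil => rfl
  | cons w ws ih =>
    simp only [List.foldl_cons]
    rw [ih, PySem.Dict.keys_foldl_insert _ (fun _ _ => ()) _]

theorem pv_pairInner_eq_filtered (D : List Char) (c : Char) (m : Char → Int) (pc : PvPair) :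
    D.foldl (fun pc d => if d ≠ c then pc.insert (c, d) (pc.getD (c, d) 0 + m d) else pc) pc
    = (D.filter (fun d => decide (d ≠ c))).foldl
        (fun pc d => pc.insert (c, d) (pc.getD (c, d) 0 + m d)) pc :=
  PySem.List.foldl_ite_eq_foldl_filter _ _ _ _

theorem pv_pairInner_keys (D : List Char) (c : Char) (m : Char → Int) (pc : PvPair) :
    (D.foldl (fun pc d => if d ≠ c then pc.insert (c, d) (pc.getD (c, d) 0 + m d) else pc) pc).keys
    = PySem.Set.update pc.keys ((D.filter (fun d => decide (d ≠ c))).map (fun d => (c, d))) := by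
  rw [pv_pairInner_eq_filtered]
  exact PySem.Dict.keys_foldl_insert_key _ (fun d => (c, d)) (fun pc d => pc.getD (c, d) 0 + m d) _

theorem pv_pairInner_nodup (D : List Char) (c : Char) (m : Char → Int) (pc : PvPair)
    (h : pc.keys.Nodup) :
    (D.foldl (fun pc d => if d ≠ c then pc.insert (c, d) (pc.getD (c, d) 0 + m d) else pc) pc).keys.Nodup := by
  rw [pv_pairInner_eq_filtered]
  exact PySem.Dict.nodup_keys_foldl_insert_key _ (fun d => (c, d)) (fun pc d => pc.getD (c, d) 0 + m d) _ h

theorem pv_pairInner_getD (D : List Char) (hD : D.Nodup) (c : Char) (m : Char → Int) (pc : PvPair)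
    (a b : Char) :
    (D.foldl (fun pc d => if d ≠ c then pc.insert (c, d) (pc.getD (c, d) 0 + m d) else pc) pc).getD (a, b) 0
    = if a = c ∧ b ∈ D ∧ b ≠ c then pc.getD (a, b) 0 + m b else pc.getD (a, b) 0 := by
  induction D generalizing pc with
  | nil => simp
  | cons e D ih =>
    have hD' := hD.of_cons
    have he : e ∉ D := (List.nodup_cons.1 hD).1
    simp only [List.foldl_cons]
    by_cases hec : e ≠ c
    · rw [if_pos hec, ih hD']
      by_cases h1 : a = c ∧ b ∈ D ∧ b ≠ c
      · have hbe : b ≠ e := fun hh => he (hh ▸ h1.2.1)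
        have h2 : a = c ∧ b ∈ e :: D ∧ b ≠ c := ⟨h1.1, List.mem_cons.2 (Or.inr h1.2.1), h1.2.2⟩
        rw [if_pos h1, if_pos h2, PySem.Dict.getD_insert_of_ne]
        intro hh
        exact hbe (congrArg Prod.snd hh)
      · rw [if_neg h1]
        by_cases h2 : a = c ∧ b ∈ e :: D ∧ b ≠ c
        · have hbe : b = e := by
            rcases List.mem_cons.1 h2.2.1 with h3 | h3
            · exact h3
            · exact absurd ⟨h2.1, h3, h2.2.2⟩ h1
          rw [if_pos h2, hbe, h2.1, PySem.Dict.getD_insert_self]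
        · rw [if_neg h2, PySem.Dict.getD_insert_of_ne]
          intro hh
          have ha : a = c := congrArg Prod.fst hh
          have hb : b = e := congrArg Prod.snd hh
          exact h2 ⟨ha, List.mem_cons.2 (Or.inl hb), hb ▸ hec⟩
    · rw [if_neg hec, ih hD']
      have hec2 : e = c := by tauto
      subst hec2
      by_cases h1 : a = e ∧ b ∈ D ∧ b ≠ e
      · have h2 : a = e ∧ b ∈ e :: D ∧ b ≠ e := ⟨h1.1, List.mem_cons.2 (Or.inr h1.2.1), h1.2.2⟩
        rw [if_pos h1, if_pos h2]
      · rw [if_neg h1]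
        by_cases h2 : a = e ∧ b ∈ e :: D ∧ b ≠ e
        · rcases List.mem_cons.1 h2.2.1 with h3 | h3
          · exact absurd h3 h2.2.2
          · exact absurd ⟨h2.1, h3, h2.2.2⟩ h1
        · rw [if_neg h2]

theorem pv_pairOuter_keys (E D : List Char) (M : Char → Char → Int) (pc : PvPair) :
    (E.foldl (fun pc c =>
        D.foldl (fun pc d => if d ≠ c then pc.insert (c, d) (pc.getD (c, d) 0 + M c d) else pc) pc) pc).keys
    = PySem.Set.update pc.keys
        (E.flatMap (fun c => (D.filter (fun d => decide (d ≠ c))).map (fun d => (c, d)))) := by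
  induction E generalizing pc with
  | nil => rfl
  | cons c E ih =>
    simp only [List.foldl_cons, List.flatMap_cons]
    rw [ih, pv_pairInner_keys]
    show _ = List.foldl PySem.Set.add pc.keys (_ ++ _)
    rw [List.foldl_append]
    rfl

theorem pv_pairOuter_nodup (E D : List Char) (M : Char → Char → Int) (pc : PvPair)
    (h : pc.keys.Nodup) :
    (E.foldl (fun pc c =>
        D.foldl (fun pc d => if d ≠ c then pc.insert (c, d) (pc.getD (c, d) 0 + M c d) else pc) pc) pc).keys.Nodup := by
  induction E generalizing pc with
  | nil => exact h
  | cons c E ih =>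
    simp only [List.foldl_cons]
    exact ih _ (pv_pairInner_nodup D c (M c) pc h)

theorem pv_pairOuter_getD (E D : List Char) (hE : E.Nodup) (hD : D.Nodup)
    (M : Char → Char → Int) (pc : PvPair) (a b : Char) :
    (E.foldl (fun pc c =>
        D.foldl (fun pc d => if d ≠ c then pc.insert (c, d) (pc.getD (c, d) 0 + M c d) else pc) pc) pc).getD (a, b) 0
    = pc.getD (a, b) 0 + (if a ∈ E ∧ b ∈ D ∧ b ≠ a then M a b else 0) := by
  induction E generalizing pc with
  | nil => simp
  | cons c E ih =>
    have hE' := hE.of_cons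
    have hc : c ∉ E := (List.nodup_cons.1 hE).1
    simp only [List.foldl_cons]
    rw [ih hE', pv_pairInner_getD D hD c (M c) pc a b]
    by_cases hac : a = c
    · subst hac
      have hnE : ¬ (a ∈ E ∧ b ∈ D ∧ b ≠ a) := fun hh => hc hh.1
      rw [if_neg hnE]
      by_cases h1 : b ∈ D ∧ b ≠ a
      · rw [if_pos ⟨rfl, h1⟩, if_pos ⟨List.mem_cons.2 (Or.inl rfl), h1⟩]
        ring
      · rw [if_neg (fun hh => h1 hh.2), if_neg (fun hh => h1 hh.2), add_zero]
    · rw [if_neg (fun hh => hac hh.1)]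
      by_cases h1 : a ∈ E ∧ b ∈ D ∧ b ≠ a
      · rw [if_pos h1, if_pos ⟨List.mem_cons.2 (Or.inr h1.1), h1.2⟩]
      · rw [if_neg h1, if_neg (fun hh => h1 ⟨(List.mem_cons.1 hh.1).resolve_left hac, hh.2⟩)]

theorem pv_pairStep_keys (w : List Char) (pc : PvPair) :
    (pvPairStep w pc).keys = PySem.Set.update pc.keys (pvPairList w) :=
  pv_pairOuter_keys _ _ _ _

theorem pv_pairStep_nodup (w : List Char) (pc : PvPair) (h : pc.keys.Nodup) :
    (pvPairStep w pc).keys.Nodup :=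
  pv_pairOuter_nodup _ _ _ _ h

theorem pv_pairStep_getD (w : List Char) (pc : PvPair) (a b : Char) :
    (pvPairStep w pc).getD (a, b) 0
    = pc.getD (a, b) 0 + (if a ≠ b then (w.count a : Int) * (w.count b : Int) else 0) := by
  rw [pvPairStep, pv_pairOuter_getD _ _ (PySem.Set.nodup_ofList w) (PySem.Set.nodup_ofList w)]
  congr 1
  by_cases hab : a ≠ b
  · rw [if_pos hab]
    by_cases ha : a ∈ w
    · by_cases hb : b ∈ w
      · rw [if_pos ⟨(PySem.Set.mem_ofList _ _).2 ha, (PySem.Set.mem_ofList _ _).2 hb, Ne.symm hab⟩]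
      · rw [if_neg (fun hh => hb ((PySem.Set.mem_ofList _ _).1 hh.2.1)),
          List.count_eq_zero.2 hb]
        simp
    · rw [if_neg (fun hh => ha ((PySem.Set.mem_ofList _ _).1 hh.1)), List.count_eq_zero.2 ha]
      simp
  · have : a = b := by tauto
    subst this
    simp

theorem pv_pc_run (ws : List String) (pc : PvPair) (h : pc.keys.Nodup) :
    (ws.foldl (fun pc w => pvPairStep w.toList pc) pc).keys
        = ws.foldl (fun s w => PySem.Set.update s (pvPairList w.toList)) pc.keys
    ∧ (ws.foldl (fun pc w => pvPairStep w.toList pc) pc).keys.Nodup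
    ∧ (∀ a b, (ws.foldl (fun pc w => pvPairStep w.toList pc) pc).getD (a, b) 0
        = pc.getD (a, b) 0
          + (ws.map (fun w =>
              if a ≠ b then (w.toList.count a : Int) * (w.toList.count b : Int) else 0)).sum) := by
  induction ws generalizing pc with
  | nil => exact ⟨rfl, h, fun a b => by simp⟩
  | cons w ws ih =>
    obtain ⟨k1, k2, k3⟩ := ih (pvPairStep w.toList pc) (pv_pairStep_nodup _ _ h)
    refine ⟨?_, k2, ?_⟩
    · simp only [List.foldl_cons]
      rw [k1, pv_pairStep_keys]
    · intro a b
      simp only [List.foldl_cons]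
      rw [k3 a b, pv_pairStep_getD]
      simp only [List.map_cons, List.sum_cons]
      ring

-- ---- assembly building blocks ----

theorem pv_getD_foldl_insert_const (l : List Char) (v : PvInner) (r : PvOuter) (x : Char) :
    (l.foldl (fun r c => r.insert c v) r).getD x PySem.Dict.empty
      = if x ∈ l then v else r.getD x PySem.Dict.empty := by
  induction l generalizing r with
  | nil => simp
  | cons c l ih =>
    simp only [List.foldl_cons]
    rw [ih]
    by_cases hx : x ∈ l
    · simp [hx]
    · by_cases hxc : x = c
      · subst hxc
        simp [hx, PySem.Dict.getD_insert_self]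
      · simp [hx, hxc, PySem.Dict.getD_insert_of_ne _ _ _ hxc]

theorem pv_assemble_getD (L : List ((Char × Char) × Int)) (r : PvOuter) (c : Char) :
    (L.foldl (fun r q => r.modify q.1.1 PySem.Dict.empty (fun i => i.insert q.1.2 q.2)) r).getD c PySem.Dict.empty
    = (L.filter (fun q => decide (q.1.1 = c))).foldl (fun i q => i.insert q.1.2 q.2)
        (r.getD c PySem.Dict.empty) := by
  induction L generalizing r with
  | nil => rfl
  | cons q L ih =>
    simp only [List.foldl_cons, List.filter_cons]
    rw [ih]
    by_cases hq : q.1.1 = c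
    · simp only [hq, decide_true, if_pos]
      rw [PySem.Dict.getD_modify]
      simp [hq]
    · simp only [hq, decide_false]
      rw [PySem.Dict.getD_modify]
      simp [Ne.symm hq, hq]

-- ---- order and membership facts ----

theorem pv_innerKeys_aux_ne (ws : List String) (c : Char) (s : List Char) (hs : ∀ d ∈ s, d ≠ c) :
    ∀ d ∈ ws.foldl (fun s w =>
        if c ∈ w.toList then PySem.Set.update s (w.toList.filter (fun x => decide (c ≠ x))) else s) s,
      d ≠ c := by
  induction ws generalizing s with
  | nil => exact hs
  | cons w ws ih =>
    simp only [List.foldl_cons]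
    apply ih
    intro d hd
    by_cases hc : c ∈ w.toList
    · rw [if_pos hc] at hd
      rcases (PySem.Set.mem_update _ _ _).1 hd with h1 | h1
      · exact hs d h1
      · have := (List.mem_filter.1 h1).2
        simp at this
        exact Ne.symm this
    · rw [if_neg hc] at hd
      exact hs d hd

theorem pv_innerKeys_ne (ws : List String) (c : Char) : ∀ d ∈ pvInnerKeys ws c, d ≠ c :=
  pv_innerKeys_aux_ne ws c [] (by simp)

theorem pv_innerKeys_nodup (ws : List String) (c : Char) : (pvInnerKeys ws c).Nodup := by
  rw [pvInnerKeys]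
  generalize hs : ([] : List Char) = s
  have h : s.Nodup := by rw [← hs]; simp
  clear hs
  induction ws generalizing s with
  | nil => exact h
  | cons w ws ih =>
    simp only [List.foldl_cons]
    apply ih
    by_cases hc : c ∈ w.toList
    · rw [if_pos hc]; exact PySem.Set.nodup_update _ _ h
    · rw [if_neg hc]; exact h

theorem pv_keysAll_aux_nodup (ws : List String) (s : List Char) (h : s.Nodup) :
    (ws.foldl (fun s w => PySem.Set.update s w.toList) s).Nodup := by
  induction ws generalizing s with
  | nil => exact h
  | cons w ws ih =>
    simp only [List.foldl_cons]
    exact ih _ (PySem.Set.nodup_update _ _ h)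

theorem pv_keysAll_nodup (ws : List String) : (pvKeysAll ws).Nodup :=
  pv_keysAll_aux_nodup ws [] (by simp)

theorem pv_mem_pairList_fst (w : List Char) (q : Char × Char) (h : q ∈ pvPairList w) :
    q.1 ∈ w := by
  rw [pvPairList] at h
  obtain ⟨c, hc, hq⟩ := List.mem_flatMap.1 h
  obtain ⟨d, _, hd⟩ := List.mem_map.1 hq
  have : q.1 = c := by rw [← hd]
  rw [this]
  exact (PySem.Set.mem_ofList _ _).1 hc

theorem pv_pairKeys_fst_mem_aux (ws : List String) (s : List (Char × Char)) (k : List Char)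
    (hsk : ∀ q ∈ s, q.1 ∈ k) :
    ∀ q ∈ ws.foldl (fun s w => PySem.Set.update s (pvPairList w.toList)) s,
      q.1 ∈ ws.foldl (fun s w => PySem.Set.update s w.toList) k := by
  induction ws generalizing s k with
  | nil => exact hsk
  | cons w ws ih =>
    simp only [List.foldl_cons]
    apply ih
    intro q hq
    rcases (PySem.Set.mem_update _ _ _).1 hq with h1 | h1
    · exact (PySem.Set.mem_update _ _ _).2 (Or.inl (hsk q h1))
    · exact (PySem.Set.mem_update _ _ _).2 (Or.inr (pv_mem_pairList_fst _ _ h1))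

theorem pv_pairKeys_fst_mem (ws : List String) :
    ∀ q ∈ pvPairKeys ws, q.1 ∈ pvKeysAll ws :=
  pv_pairKeys_fst_mem_aux ws [] [] (by simp)

theorem pv_filter_flatMap_chunks (E : List Char) (hE : E.Nodup) (chunk : Char → List Char) (c : Char) :
    (E.flatMap (fun c' => (chunk c').map (fun d => (c', d)))).filter (fun q => decide (q.1 = c))
    = if c ∈ E then (chunk c).map (fun d => (c, d)) else [] := by
  induction E with
  | nil => simp
  | cons e E ih =>
    have hE' := hE.of_cons
    have he : e ∉ E := (List.nodup_cons.1 hE).1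
    simp only [List.flatMap_cons, List.filter_append]
    rw [ih hE']
    have hchunk : ((chunk e).map (fun d => (e, d))).filter (fun q => decide (q.1 = c))
        = if e = c then (chunk e).map (fun d => (e, d)) else [] := by
      rw [List.filter_map]
      by_cases hec : e = c
      · rw [if_pos hec]
        have : ((fun q : Char × Char => decide (q.1 = c)) ∘ fun d => (e, d)) = fun _ => true := by
          funext d; simp [hec]
        rw [this, List.filter_true]
      · rw [if_neg hec]
        have : ((fun q : Char × Char => decide (q.1 = c)) ∘ fun d => (e, d)) = fun _ => false := by
          funext d; simp [hec]
        rw [this, List.filter_false, List.map_nil]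
    rw [hchunk]
    by_cases hec : e = c
    · subst hec
      rw [if_pos rfl, if_neg he, if_pos (List.mem_cons.2 (Or.inl rfl)), List.append_nil]
    · rw [if_neg hec]
      by_cases hcE : c ∈ E
      · rw [if_pos hcE, if_pos (List.mem_cons.2 (Or.inr hcE)), List.nil_append]
      · rw [if_neg hcE, if_neg (by
          intro hh
          rcases List.mem_cons.1 hh with h1 | h1
          · exact hec h1.symm
          · exact hcE h1)]
        rfl

theorem pv_pairList_filter (w : List Char) (c : Char) :
    (pvPairList w).filter (fun q => decide (q.1 = c))
    = if c ∈ w then ((PySem.Set.ofList w).filter (fun d => decide (d ≠ c))).map (fun d => (c, d))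
      else [] := by
  rw [pvPairList, pv_filter_flatMap_chunks _ (PySem.Set.nodup_ofList w)
    (fun c' => (PySem.Set.ofList w).filter (fun d => decide (d ≠ c'))) c]
  by_cases hc : c ∈ w
  · rw [if_pos ((PySem.Set.mem_ofList _ _).2 hc), if_pos hc]
  · rw [if_neg (fun hh => hc ((PySem.Set.mem_ofList _ _).1 hh)), if_neg hc]

theorem pv_pair_inj (c : Char) : Function.Injective (fun d : Char => (c, d)) := by
  intro x y h
  exact congrArg Prod.snd h

theorem pv_filter_pairKeys (ws : List String) (c : Char) (s : List (Char × Char)) (t : List Char)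
    (hst : s.filter (fun q => decide (q.1 = c)) = t.map (fun d => (c, d))) :
    (ws.foldl (fun s w => PySem.Set.update s (pvPairList w.toList)) s).filter (fun q => decide (q.1 = c))
    = (ws.foldl (fun t w =>
        if c ∈ w.toList then PySem.Set.update t (w.toList.filter (fun x => decide (c ≠ x))) else t) t).map
        (fun d => (c, d)) := by
  induction ws generalizing s t with
  | nil => exact hst
  | cons w ws ih =>
    simp only [List.foldl_cons]
    apply ih
    rw [pv_filter_update, pv_pairList_filter, hst]
    by_cases hc : c ∈ w.toList
    · rw [if_pos hc, if_pos hc, pv_update_map _ (pv_pair_inj c)]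
      congr 1
      rw [pv_update_filter_ofList]
      apply congrArg
      apply List.filter_congr
      intro x _
      simp [ne_comm]
    · rw [if_neg hc, if_neg hc]
      rfl

theorem pv_count_filter_ne (w : List Char) (c v : Char) (hv : v ≠ c) :
    (w.filter (fun x => decide (c ≠ x))).count v = w.count v :=
  List.count_filter (by simpa using Ne.symm hv)

theorem pv_filter_pairKeys' (ws : List String) (c : Char) :
    (pvPairKeys ws).filter (fun q => decide (q.1 = c)) = (pvInnerKeys ws c).map (fun d => (c, d)) :=
  pv_filter_pairKeys ws c [] [] rfl

theorem pv_fold_insert_items (l : List Char) (hl : l.Nodup) (v : Char → Int) :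
    (l.foldl (fun (i : PvInner) d => i.insert d (v d)) PySem.Dict.empty).items
      = l.map (fun d => (d, v d)) := by
  have h := PySem.Dict.items_foldl_insert_fresh l (fun d => d) v PySem.Dict.empty
    (fun a _ => by simp) (by simpa using hl)
  simpa using h

theorem pv_final (ws : List String) : solve ws = solve_alt ws := by
  show (ws.foldl (fun db w => pvStepA w.toList db) PySem.Dict.empty).items.map
        (fun p => (p.1.toString, p.2.items.map (fun q => (q.1.toString, q.2))))
    = ((ws.foldl pvBodyB (PySem.Dict.empty, PySem.Dict.empty)).2.items.foldl
          (fun r q => r.modify q.1.1 PySem.Dict.empty (fun inner => inner.insert q.1.2 q.2))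
          ((ws.foldl pvBodyB (PySem.Dict.empty, PySem.Dict.empty)).1.keys.foldl
            (fun r c => r.insert c PySem.Dict.empty) PySem.Dict.empty)).items.map
        (fun p => (p.1.toString, p.2.items.map (fun q => (q.1.toString, q.2))))
  rw [pv_B_split]
  simp only
  set A := ws.foldl (fun db w => pvStepA w.toList db) (PySem.Dict.empty : PvOuter) with hAdef
  set pc := ws.foldl (fun pc w => pvPairStep w.toList pc) (PySem.Dict.empty : PvPair) with hpcdef
  set co := ws.foldl (fun co w => w.toList.foldl (fun co ch => co.insert ch ()) co)
    (PySem.Dict.empty : PySem.Dict Char Unit) with hcodef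
  have hInvE : pvInv (PySem.Dict.empty : PvOuter) := ⟨by simp, fun x => by simp⟩
  obtain ⟨hKA, hInvA, hIKA, hIVA⟩ := pv_A_run ws PySem.Dict.empty hInvE
  obtain ⟨hKP, hNP, hVP⟩ := pv_pc_run ws PySem.Dict.empty (by simp)
  have hKA' : A.keys = pvKeysAll ws := by
    rw [hAdef]
    simpa [pvKeysAll] using hKA
  have hKP' : pc.keys = pvPairKeys ws := by
    rw [hpcdef]
    simpa [pvPairKeys] using hKP
  have hKco : co.keys = pvKeysAll ws := by
    rw [hcodef, pv_co_run]
    simp [pvKeysAll]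
  have hIK : ∀ c, (A.getD c PySem.Dict.empty).keys = pvInnerKeys ws c := by
    intro c
    rw [hAdef]
    simpa [pvInnerKeys] using hIKA c
  have hIV : ∀ c d, (A.getD c PySem.Dict.empty).getD d 0
      = (ws.map (fun w => (w.toList.count c : Int)
          * ((w.toList.filter (fun x => decide (c ≠ x))).count d : Int))).sum := by
    intro c d
    rw [hAdef]
    simpa using hIVA c d
  have hPV : ∀ a b, pc.getD (a, b) 0
      = (ws.map (fun w =>
          if a ≠ b then (w.toList.count a : Int) * (w.toList.count b : Int) else 0)).sum := by
    intro a b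
    rw [hpcdef]
    simpa using hVP a b
  set R0 := co.keys.foldl (fun r c => r.insert c PySem.Dict.empty) (PySem.Dict.empty : PvOuter) with hR0def
  set R := pc.items.foldl
    (fun r q => r.modify q.1.1 PySem.Dict.empty (fun inner => inner.insert q.1.2 q.2)) R0 with hRdef
  have hKR0 : R0.keys = pvKeysAll ws := by
    rw [hR0def, PySem.Dict.keys_foldl_insert _ (fun _ _ => PySem.Dict.empty) _, hKco]
    have he : (PySem.Dict.empty : PvOuter).keys = [] := by simp
    rw [he, pv_update_nil_of_nodup _ (pv_keysAll_nodup ws)]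
  have hGR0 : ∀ c, R0.getD c PySem.Dict.empty = PySem.Dict.empty := by
    intro c
    rw [hR0def, pv_getD_foldl_insert_const]
    split
    · rfl
    · simp
  have hKR : R.keys = pvKeysAll ws := by
    have hx := PySem.Dict.keys_foldl_modify_key pc.items
      (fun q : (Char × Char) × Int => q.1.1) (PySem.Dict.empty : PvInner)
      (fun _ q inner => PySem.Dict.insert inner q.1.2 q.2) R0
    rw [hRdef, hx, hKR0]
    apply pv_update_of_subset
    intro x hx
    obtain ⟨q, hq, hqx⟩ := List.mem_map.1 hx
    have hq1 : q.1 ∈ pc.keys := PySem.Dict.mem_keys_of_mem_items _ hq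
    rw [hKP'] at hq1
    rw [← hqx]
    exact pv_pairKeys_fst_mem ws q.1 hq1
  have hNR : R.keys.Nodup := by rw [hKR]; exact pv_keysAll_nodup ws
  have hInner : ∀ c, (R.getD c PySem.Dict.empty).items = (A.getD c PySem.Dict.empty).items := by
    intro c
    have hitems : pc.items = (pvPairKeys ws).map (fun q => (q, pc.getD q 0)) := by
      rw [PySem.Dict.items_eq_map_keys pc hNP 0, hKP']
    have hfil : pc.items.filter (fun q => decide (q.1.1 = c))
        = ((pvInnerKeys ws c).map (fun d => (c, d))).map (fun q => (q, pc.getD q 0)) := by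
      rw [hitems, List.filter_map]
      rw [show ((fun q : (Char × Char) × Int => decide (q.1.1 = c)) ∘ (fun q => (q, pc.getD q 0)))
          = (fun q : Char × Char => decide (q.1 = c)) from rfl]
      rw [pv_filter_pairKeys' ws c]
    have hRc : (R.getD c PySem.Dict.empty).items
        = (pvInnerKeys ws c).map (fun d => (d, pc.getD (c, d) 0)) := by
      rw [hRdef, pv_assemble_getD, hGR0 c, hfil]
      simp only [List.foldl_map]
      rw [pv_fold_insert_items _ (pv_innerKeys_nodup ws c)]
    have hAc : (A.getD c PySem.Dict.empty).items
        = (pvInnerKeys ws c).map (fun d => (d, (A.getD c PySem.Dict.empty).getD d 0)) := by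
      rw [PySem.Dict.items_eq_map_keys _ (hInvA.2 c) 0, hIK c]
    rw [hRc, hAc]
    apply List.map_congr_left
    intro d hd
    have hdc : d ≠ c := pv_innerKeys_ne ws c d hd
    have hval : pc.getD (c, d) 0 = (A.getD c PySem.Dict.empty).getD d 0 := by
      rw [hPV c d, hIV c d]
      have hfun : (fun w : String =>
            if c ≠ d then (w.toList.count c : Int) * (w.toList.count d : Int) else 0)
          = (fun w : String => (w.toList.count c : Int)
              * ((w.toList.filter (fun x => decide (c ≠ x))).count d : Int)) := by
        funext w
        rw [if_pos (Ne.symm hdc), pv_count_filter_ne w.toList c d hdc]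
      rw [hfun]
    rw [hval]
  have hAitems : A.items = (pvKeysAll ws).map (fun c => (c, A.getD c PySem.Dict.empty)) := by
    rw [PySem.Dict.items_eq_map_keys A hInvA.1 PySem.Dict.empty, hKA']
  have hRitems : R.items = (pvKeysAll ws).map (fun c => (c, R.getD c PySem.Dict.empty)) := by
    rw [PySem.Dict.items_eq_map_keys R hNR PySem.Dict.empty, hKR]
  rw [hAitems, hRitems, List.map_map, List.map_map]
  apply List.map_congr_left
  intro c _
  show (c.toString, (A.getD c PySem.Dict.empty).items.map (fun q => (q.1.toString, q.2)))
    = (c.toString, (R.getD c PySem.Dict.empty).items.map (fun q => (q.1.toString, q.2)))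
  rw [hInner c]

-- ===== VERDICT (by name: the statement is the Claim_ definition above) =====
theorem solve_spec : Claim_equal_solve := by
  intro ws _
  exact pv_final ws
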